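-- pv_equiv track=rewrite | github.com/ShinSeongJin2/ontology-studio | backend/src/modules/agent_session/service.py | _build_preprocessing_todos
-- ===== SOURCE A (Python) =====
-- def _build_preprocessing_todos(current_stage: str) -> list[dict[str, str]]:
--     stages = [
--         ("ocr", "문서 텍스트 추출"),
--         ("embedding", "청크 임베딩 생성"),
--         ("neo4j_upsert", "Neo4j 문서 그래프 업로드"),
--         ("agent_build", "온톨로지 구축 에이전트 실행"),
--     ]
--     completed = True
--     items = []
--     for stage_id, label in stages:
--         if stage_id == current_stage:
--             items.append({"id": stage_id, "content": label, "status": "in_progress"})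
--             completed = False
--             continue
--         if completed:
--             items.append({"id": stage_id, "content": label, "status": "completed"})
--         else:
--             items.append({"id": stage_id, "content": label, "status": "pending"})
--     return items
-- ===== SOURCE B (Python) =====
-- def _build_preprocessing_todos(current_stage: str) -> list[dict[str, str]]:
--     stages = [
--         ("ocr", "문서 텍스트 추출"),
--         ("embedding", "청크 임베딩 생성"),
--         ("neo4j_upsert", "Neo4j 문서 그래프 업로드"),
--         ("agent_build", "온톨로지 구축 에이전트 실행"),
--     ]
--     ids = [sid for sid, _ in stages]
--     idx = ids.index(current_stage) if current_stage in ids else len(stages)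
--     return [
--         {
--             "id": sid,
--             "content": label,
--             "status": "completed" if i < idx else ("in_progress" if i == idx else "pending"),
--         }
--         for i, (sid, label) in enumerate(stages)
--     ]
-- ===== Notes on version B (the rewrite author's own statement) =====
-- stated objective: simpler
-- what changed: Replaced the running `completed` boolean flag with a precomputed pivot index of current_stage (defaulting to len(stages) when absent) and assigns each status by comparing the position to that index in a single comprehension.
import Mathlib
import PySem

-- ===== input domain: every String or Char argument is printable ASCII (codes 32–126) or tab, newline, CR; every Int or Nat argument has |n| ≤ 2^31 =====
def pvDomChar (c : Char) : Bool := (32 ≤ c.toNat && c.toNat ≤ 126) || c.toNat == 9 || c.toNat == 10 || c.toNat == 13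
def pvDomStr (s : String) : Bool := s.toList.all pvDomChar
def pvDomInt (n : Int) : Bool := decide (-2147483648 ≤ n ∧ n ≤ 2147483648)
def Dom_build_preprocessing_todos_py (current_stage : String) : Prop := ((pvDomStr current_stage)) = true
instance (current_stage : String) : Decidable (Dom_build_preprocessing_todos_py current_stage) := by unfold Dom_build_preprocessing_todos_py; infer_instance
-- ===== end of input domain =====

-- B replaces A's running `completed` boolean with a precomputed pivot index (len(stages) when absent)
-- and assigns each status by position comparison; objective: simpler decomposition, same cost.

-- the fixed stage table (shared literal data, not logic)
def pvStages : List (String × String) :=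
  [("ocr", "문서 텍스트 추출"),
   ("embedding", "청크 임베딩 생성"),
   ("neo4j_upsert", "Neo4j 문서 그래프 업로드"),
   ("agent_build", "온톨로지 구축 에이전트 실행")]

-- ===== PORT A =====
-- loop with the running `completed` flag, as in A
def build_preprocessing_todos_py (current_stage : String) : List (List (String × String)) :=
  let st := pvStages.foldl
    (fun (st : Bool × List (List (String × String))) p =>
      let (completed, items) := st
      let (stage_id, label) := p
      if stage_id = current_stage then
        (false, items ++ [[("id", stage_id), ("content", label), ("status", "in_progress")]])
      else if completed then
        (completed, items ++ [[("id", stage_id), ("content", label), ("status", "completed")]])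
      else
        (completed, items ++ [[("id", stage_id), ("content", label), ("status", "pending")]]))
    (true, [])
  st.2

-- ===== PORT B =====
def build_preprocessing_todos_py_alt (current_stage : String) : List (List (String × String)) :=
  let ids := pvStages.map Prod.fst
  let idx : Nat :=
    if ids.contains current_stage then (PySem.List.index? ids current_stage).getD 0
    else pvStages.length
  (PySem.List.enumerate pvStages).map (fun q =>
    [("id", q.2.1), ("content", q.2.2),
     ("status",
       if q.1 < (idx : Int) then "completed"
       else if q.1 = (idx : Int) then "in_progress"
       else "pending")])

-- ===== PRECONDITION & SPEC =====
def Spec_build_preprocessing_todos_py (current_stage : String) (out : List (List (String × String))) : Prop := out = build_preprocessing_todos_py_alt current_stage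
instance (current_stage : String) (out : List (List (String × String))) : Decidable (Spec_build_preprocessing_todos_py current_stage out) := by unfold Spec_build_preprocessing_todos_py; infer_instance

-- ===== CLAIM (what is proved, stated in full; the proofs are below) =====
def Claim_equal_build_preprocessing_todos_py : Prop := ∀ (current_stage : String), Dom_build_preprocessing_todos_py current_stage → Spec_build_preprocessing_todos_py current_stage (build_preprocessing_todos_py current_stage)

-- ===== LEMMAS AND PROOFS =====

-- ===== VERDICT (by name: the statement is the Claim_ definition above) =====
theorem build_preprocessing_todos_py_spec : Claim_equal_build_preprocessing_todos_py := by
  intro cs _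
  unfold Spec_build_preprocessing_todos_py
  by_cases h1 : "ocr" = cs
  · subst h1; decide
  by_cases h2 : "embedding" = cs
  · subst h2; decide
  by_cases h3 : "neo4j_upsert" = cs
  · subst h3; decide
  by_cases h4 : "agent_build" = cs
  · subst h4; decide
  simp [build_preprocessing_todos_py, build_preprocessing_todos_py_alt, pvStages,
    PySem.List.enumerate, h1, h2, h3, h4, Ne.symm h1, Ne.symm h2, Ne.symm h3, Ne.symm h4,
    List.foldl]
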